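-- pv_equiv track=rewrite | github.com/SuyeonSun/coding_test | 백준/Silver/2512. 예산/예산.py | find_max_budget
-- ===== SOURCE A (Python) =====
-- def find_max_budget(requests, total_budget):
--     start, end = 0, max(requests)
--
--     while start <= end:
--         mid = (start + end) // 2
--
--         # 예산을 계산하는 부분을 더 쉽게 작성
--         allocated_budget = 0
--         for req in requests:
--             if req > mid:
--                 allocated_budget += mid
--             else:
--                 allocated_budget += req
--
--         if allocated_budget <= total_budget:
--             start = mid + 1
--         else:
--             end = mid - 1
--
--     return end
-- ===== SOURCE B (Python) =====
-- def find_max_budget(requests, total_budget):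
--     rs = sorted(requests)
--     n = len(rs)
--     prefix = 0
--     for i, r in enumerate(rs):
--         remaining = n - i
--         if prefix + r * remaining > total_budget:
--             return (total_budget - prefix) // remaining
--         prefix += r
--     return rs[-1]
-- ===== Notes on version B (the rewrite author's own statement) =====
-- stated objective: alternative
-- what changed: replaced the binary search over the cap (recomputing the allocation sum for every candidate) by a single sort-and-prefix-sum scan that computes the exact cutoff (total_budget - prefix) // remaining directly
-- intended difference: On inputs where even a cap of -1 over-allocates (sum(min(r,-1)) > total_budget, only reachable with negative budgets/requests), A returns a clamped search-range sentinel (-1, or max(requests) when all requests are negative) while B returns the exact largest cap c with sum(min(r,c)) <= total_budget, which is the intended value. — e.g. on find_max_budget([5], -10): A returns -1, B returns -10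
import Mathlib
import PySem

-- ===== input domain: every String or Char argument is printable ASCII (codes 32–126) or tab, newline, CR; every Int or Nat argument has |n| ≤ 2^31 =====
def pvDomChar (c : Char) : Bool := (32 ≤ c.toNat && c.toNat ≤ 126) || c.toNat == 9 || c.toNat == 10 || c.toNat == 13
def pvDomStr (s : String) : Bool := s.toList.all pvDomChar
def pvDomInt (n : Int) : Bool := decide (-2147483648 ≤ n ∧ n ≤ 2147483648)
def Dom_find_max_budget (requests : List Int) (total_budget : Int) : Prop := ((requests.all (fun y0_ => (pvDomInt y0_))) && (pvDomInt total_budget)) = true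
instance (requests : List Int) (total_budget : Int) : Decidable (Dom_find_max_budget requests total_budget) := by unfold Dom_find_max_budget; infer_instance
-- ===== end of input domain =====

-- B replaces A's binary search over the cap by one sort + prefix-sum scan computing the cutoff directly
-- (an alternative algorithm); on the D_ inputs below B returns the exact cap where A returns a clamped sentinel.

-- ===== PORT A =====
-- while start <= end: binary search; returns `end` on exit
def fmbLoop (requests : List Int) (t : Int) (s e : Int) : Int :=
  if h : s ≤ e then
    let mid := PySem.Int.floordiv (s + e) 2
    let allocated := requests.foldl (fun acc req => if req > mid then acc + mid else acc + req) 0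
    if allocated ≤ t then fmbLoop requests t (mid + 1) e else fmbLoop requests t s (mid - 1)
  else e
termination_by (e + 1 - s).toNat
decreasing_by
  · have hb := PySem.Int.floordiv_two_mid_bounds h
    omega
  · have hb := PySem.Int.floordiv_two_mid_bounds h
    omega

def find_max_budget (requests : List Int) (total_budget : Int) : Int :=
  match PySem.List.max? requests (fun x => x) with
  | none => 0   -- Python raises ValueError (max of empty); excluded by Pre_
  | some m => fmbLoop requests total_budget 0 m

-- ===== PORT B =====
-- the for-loop of Source B over the sorted list; `none` = the loop fell through
def fmbScan (t : Int) (acc : Int) : List Int → Option Int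
  | [] => none
  | r :: rest =>
    let remaining : Int := (rest.length : Int) + 1
    if acc + r * remaining > t then some (PySem.Int.floordiv (t - acc) remaining)
    else fmbScan t (acc + r) rest

def find_max_budget_alt (requests : List Int) (total_budget : Int) : Int :=
  let rs := PySem.List.sorted requests (fun x => x) false
  match fmbScan total_budget 0 rs with
  | some v => v
  | none => (PySem.List.pyGet? rs (-1)).getD 0   -- rs[-1]; IndexError on empty, excluded by Pre_

-- ===== PRECONDITION & SPEC =====
-- Pre_ excludes only the empty list, on which both Pythons raise (ValueError in A, IndexError in B).
def Pre_find_max_budget (requests : List Int) (total_budget : Int) : Prop := requests ≠ []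
instance (requests : List Int) (total_budget : Int) : Decidable (Pre_find_max_budget requests total_budget) := by unfold Pre_find_max_budget; infer_instance
def pvWitness_find_max_budget : List Int × Int := ([1, 2, 3], 7)

-- On inputs where even a cap of -1 over-allocates (Σ min(r,-1) > total_budget, only reachable with
-- negative budgets/requests), A returns a clamped search-range sentinel (-1, or max(requests) when all
-- requests are negative) while B returns the exact largest cap c with Σ min(r,c) ≤ total_budget,
-- which is the intended value.
def D_find_max_budget (requests : List Int) (total_budget : Int) : Prop :=
  requests ≠ [] ∧ (requests.map (fun x => min x (-1))).sum > total_budget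
instance (requests : List Int) (total_budget : Int) : Decidable (D_find_max_budget requests total_budget) := by unfold D_find_max_budget; infer_instance

def Spec_find_max_budget (requests : List Int) (total_budget : Int) (out : Int) : Prop := ¬ D_find_max_budget requests total_budget → out = find_max_budget_alt requests total_budget
instance (requests : List Int) (total_budget : Int) (out : Int) : Decidable (Spec_find_max_budget requests total_budget out) := by unfold Spec_find_max_budget; infer_instance

def pvDiffWitness_find_max_budget : List Int × Int := ([5], -10)
def pvDiffWitnessOut_find_max_budget : Int × Int := (-1, -10)

-- ===== CLAIM (what is proved, stated in full; the proofs are below) =====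
def Claim_unchanged_find_max_budget : Prop := ∀ (requests : List Int) (total_budget : Int), Dom_find_max_budget requests total_budget → Pre_find_max_budget requests total_budget → Spec_find_max_budget requests total_budget (find_max_budget requests total_budget)
def Claim_changed_find_max_budget : Prop := Dom_find_max_budget (pvDiffWitness_find_max_budget.1) (pvDiffWitness_find_max_budget.2) ∧ Pre_find_max_budget (pvDiffWitness_find_max_budget.1) (pvDiffWitness_find_max_budget.2) ∧ D_find_max_budget (pvDiffWitness_find_max_budget.1) (pvDiffWitness_find_max_budget.2) ∧ find_max_budget (pvDiffWitness_find_max_budget.1) (pvDiffWitness_find_max_budget.2) = pvDiffWitnessOut_find_max_budget.1 ∧ find_max_budget_alt (pvDiffWitness_find_max_budget.1) (pvDiffWitness_find_max_budget.2) = pvDiffWitnessOut_find_max_budget.2 ∧ pvDiffWitnessOut_find_max_budget.1 ≠ pvDiffWitnessOut_find_max_budget.2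
def Claim_exact_find_max_budget : Prop := ∀ (requests : List Int) (total_budget : Int), Dom_find_max_budget requests total_budget → Pre_find_max_budget requests total_budget → D_find_max_budget requests total_budget → find_max_budget requests total_budget ≠ find_max_budget_alt requests total_budget

-- ===== LEMMAS AND PROOFS =====

-- f(m) = Σ min(r, m), the total allocation under cap m
def pvF (xs : List Int) (m : Int) : Int := (xs.map (fun x => min x m)).sum

lemma pvF_nil (m : Int) : pvF [] m = 0 := rfl

lemma pvF_cons (x : Int) (xs : List Int) (m : Int) : pvF (x :: xs) m = min x m + pvF xs m := by
  simp [pvF]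

-- A's inner for-loop computes pvF
lemma foldl_alloc (mid : Int) : ∀ (xs : List Int) (acc : Int),
    xs.foldl (fun acc req => if req > mid then acc + mid else acc + req) acc = acc + pvF xs mid := by
  intro xs
  induction xs with
  | nil => intro acc; simp [pvF]
  | cons x xs ih =>
    intro acc
    simp only [List.foldl_cons, ih, pvF_cons]
    by_cases h : x > mid <;> simp [h] <;> omega

lemma pvF_mono (xs : List Int) {m m' : Int} (h : m ≤ m') : pvF xs m ≤ pvF xs m' := by
  induction xs with
  | nil => simp [pvF]
  | cons x xs ih => simp only [pvF_cons]; have : min x m ≤ min x m' := by omega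
                    omega

lemma pvF_perm {xs ys : List Int} (h : xs.Perm ys) (m : Int) : pvF xs m = pvF ys m := by
  exact (h.map (fun x => min x m)).sum_eq

-- cap below every element: everyone gets the cap
lemma pvF_const (xs : List Int) (m : Int) (h : ∀ x ∈ xs, m ≤ x) : pvF xs m = m * xs.length := by
  induction xs with
  | nil => simp [pvF]
  | cons x xs ih =>
    have hx := h x (by simp)
    have := ih (fun y hy => h y (by simp [hy]))
    simp only [pvF_cons, List.length_cons, this]
    have : min x m = m := by omega
    rw [this]; push_cast; ring

-- cap above every element: everyone gets their request
lemma pvF_sum (xs : List Int) (m : Int) (h : ∀ x ∈ xs, x ≤ m) : pvF xs m = xs.sum := by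
  induction xs with
  | nil => simp [pvF]
  | cons x xs ih =>
    have hx := h x (by simp)
    have := ih (fun y hy => h y (by simp [hy]))
    simp only [pvF_cons, List.sum_cons, this]
    have : min x m = x := by omega
    omega

lemma pairwise_le_getLast {l : List Int} (hs : l.Pairwise (· ≤ ·)) (h : l ≠ []) :
    ∀ x ∈ l, x ≤ l.getLast h := by
  induction l with
  | nil => simp at h
  | cons a l ih =>
    intro x hx
    rcases List.pairwise_cons.mp hs with ⟨ha, hl⟩
    cases l with
    | nil => simp at hx; simp [hx]
    | cons b l' =>
      rw [List.getLast_cons (by simp)]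
      rcases List.mem_cons.mp hx with rfl | hx'
      · exact le_trans (ha _ (List.getLast_mem _)) (le_refl _)
      · exact ih hl (by simp) x hx'

-- characterization of A's binary search
lemma fmbLoop_spec (requests : List Int) (t : Int) : ∀ (n : Nat) (s e : Int), (e + 1 - s).toNat = n → s ≤ e + 1 →
    s - 1 ≤ fmbLoop requests t s e ∧ fmbLoop requests t s e ≤ e ∧
    (s ≤ fmbLoop requests t s e → pvF requests (fmbLoop requests t s e) ≤ t) ∧
    (fmbLoop requests t s e < e → ¬ (pvF requests (fmbLoop requests t s e + 1) ≤ t)) := by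
  intro n
  induction n using Nat.strong_induction_on with
  | _ n ih =>
    intro s e hn hse
    rw [fmbLoop]
    by_cases h : s ≤ e
    · rw [dif_pos h]
      have hb := PySem.Int.floordiv_two_mid_bounds h
      simp only [foldl_alloc, zero_add]
      set mid := PySem.Int.floordiv (s + e) 2 with hmid
      by_cases ha : pvF requests mid ≤ t
      · rw [if_pos ha]
        have hrec := ih (e + 1 - (mid + 1)).toNat (by omega) (mid + 1) e rfl (by omega)
        refine ⟨by omega, hrec.2.1, ?_, hrec.2.2.2⟩
        intro hs
        by_cases hc : mid + 1 ≤ fmbLoop requests t (mid + 1) e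
        · exact hrec.2.2.1 hc
        · have heq : fmbLoop requests t (mid + 1) e = mid := by
            have := hrec.1; omega
          rw [heq]; exact ha
      · rw [if_neg ha]
        have hrec := ih (mid - 1 + 1 - s).toNat (by omega) s (mid - 1) rfl (by omega)
        refine ⟨hrec.1, by omega, hrec.2.2.1, ?_⟩
        intro _
        by_cases hc : fmbLoop requests t s (mid - 1) < mid - 1
        · exact hrec.2.2.2 hc
        · have heq : fmbLoop requests t s (mid - 1) = mid - 1 := by
            have := hrec.2.1; omega
          rw [heq]
          have : mid - 1 + 1 = mid := by omega
          rw [this]; exact ha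
    · rw [dif_neg h]
      exact ⟨by omega, le_refl e, fun hs => absurd (by omega) h, fun hr => absurd hr (by omega)⟩

-- uniqueness of the characterization
lemma C_unique (requests : List Int) (t e r1 r2 : Int)
    (h1 : -1 ≤ r1 ∧ r1 ≤ e ∧ (0 ≤ r1 → pvF requests r1 ≤ t) ∧ (r1 < e → ¬ (pvF requests (r1 + 1) ≤ t)))
    (h2 : -1 ≤ r2 ∧ r2 ≤ e ∧ (0 ≤ r2 → pvF requests r2 ≤ t) ∧ (r2 < e → ¬ (pvF requests (r2 + 1) ≤ t))) :
    r1 = r2 := by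
  by_contra hne
  rcases h1 with ⟨a1, b1, c1, d1⟩
  rcases h2 with ⟨a2, b2, c2, d2⟩
  rcases lt_or_gt_of_ne hne with h | h
  · have hd := d1 (by omega)
    have hc := c2 (by omega)
    exact hd (le_trans (pvF_mono requests (by omega)) hc)
  · have hd := d2 (by omega)
    have hc := c1 (by omega)
    exact hd (le_trans (pvF_mono requests (by omega)) hc)

-- characterization of B's scan over the sorted list
lemma fmbScan_spec (t : Int) : ∀ (l : List Int) (acc : Int) (h : l ≠ []), l.Pairwise (· ≤ ·) →
    (fmbScan t acc l = none ∧ acc + pvF l (l.getLast h) ≤ t) ∨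
    (∃ r, fmbScan t acc l = some r ∧ acc + pvF l r ≤ t ∧ acc + pvF l (r + 1) > t ∧
      r < l.getLast h ∧ acc + (r + 1) * l.length > t) := by
  intro l
  induction l with
  | nil => intro acc h; exact absurd rfl h
  | cons r rest ih =>
    intro acc hne hp
    rcases List.pairwise_cons.mp hp with ⟨hr, hrest⟩
    have hlpos : (0 : Int) < (rest.length : Int) + 1 := by positivity
    by_cases hstop : acc + r * ((rest.length : Int) + 1) > t
    · right
      set rq := PySem.Int.floordiv (t - acc) ((rest.length : Int) + 1) with hrq
      have hlt : rq < r := by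
        rw [hrq, PySem.Int.floordiv_lt_iff_lt_mul hlpos]; nlinarith
      have hle : rq * ((rest.length : Int) + 1) ≤ t - acc := by
        have := (PySem.Int.le_floordiv_iff_mul_le hlpos (q := rq) (a := t - acc)).mp (le_refl rq)
        exact this
      have hgt : t - acc < (rq + 1) * ((rest.length : Int) + 1) := by
        have := (PySem.Int.floordiv_lt_iff_lt_mul hlpos (q := rq + 1) (a := t - acc)).mp (by omega)
        exact this
      have hall : ∀ x ∈ r :: rest, rq ≤ x := by
        intro x hx
        rcases List.mem_cons.mp hx with rfl | hx'
        · omega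
        · have := hr x hx'; omega
      have hall1 : ∀ x ∈ r :: rest, rq + 1 ≤ x := by
        intro x hx
        rcases List.mem_cons.mp hx with rfl | hx'
        · omega
        · have := hr x hx'; omega
      have hlen : ((r :: rest).length : Int) = (rest.length : Int) + 1 := by
        simp
      refine ⟨rq, ?_, ?_, ?_, ?_, ?_⟩
      · simp [fmbScan, hstop, hrq]
      · rw [pvF_const _ _ hall, hlen]; omega
      · rw [pvF_const _ _ hall1, hlen]; omega
      · have hlast : r ≤ (r :: rest).getLast hne := by
          exact pairwise_le_getLast hp hne r (by simp)
        omega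
      · rw [hlen]; omega
    · have hscan : fmbScan t acc (r :: rest) = fmbScan t (acc + r) rest := by
        simp [fmbScan, hstop]
      cases rest with
      | nil =>
        left
        refine ⟨by rw [hscan]; rfl, ?_⟩
        have : (r :: ([] : List Int)).getLast hne = r := rfl
        rw [this, pvF_cons, pvF_nil, min_self]
        simp only [List.length_nil, Nat.cast_zero, zero_add, mul_one] at hstop
        omega
      | cons b rest' =>
        have hne' : b :: rest' ≠ [] := by simp
        have hlastc : (r :: b :: rest').getLast hne = (b :: rest').getLast hne' :=
          List.getLast_cons hne'
        have hLpos : (0 : Int) < ((b :: rest').length : Int) := by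
          simp
        rcases ih (acc + r) hne' hrest with ⟨hnone, hfit⟩ | ⟨rq, hsome, h1, h2, h3, h4⟩
        · left
          refine ⟨by rw [hscan]; exact hnone, ?_⟩
          have hrlast : r ≤ (b :: rest').getLast hne' :=
            hr _ (List.getLast_mem hne')
          rw [hlastc, pvF_cons]
          have : min r ((b :: rest').getLast hne') = r := by omega
          omega
        · right
          -- first: r ≤ rq
          have hmul : r * (((b :: rest').length : Int) + 1) =
              r * ((b :: rest').length : Int) + r := by ring
          have hrle : r ≤ rq := by
            rw [hmul] at hstop
            have hmm : r * ((b :: rest').length : Int) < (rq + 1) * ((b :: rest').length : Int) := by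
              linarith
            have := lt_of_mul_lt_mul_right hmm (le_of_lt hLpos)
            omega
          refine ⟨rq, by rw [hscan]; exact hsome, ?_, ?_, ?_, ?_⟩
          · rw [pvF_cons]
            have : min r rq = r := by omega
            omega
          · rw [pvF_cons]
            have : min r (rq + 1) = r := by omega
            omega
          · rw [hlastc]; exact h3
          · have hexp : (rq + 1) * (((r :: b :: rest').length : Int)) =
                (rq + 1) * ((b :: rest').length : Int) + (rq + 1) := by
              simp [List.length_cons]; ring
            rw [hexp]
            linarith

-- shared setup: max element and the sorted list
lemma max_facts (requests : List Int) (hpre : requests ≠ []) :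
    ∃ M, PySem.List.max? requests (fun x => x) = some M ∧ M ∈ requests ∧ ∀ y ∈ requests, y ≤ M := by
  cases hmx : PySem.List.max? requests (fun x => x) with
  | none =>
    have hiff := PySem.List.max?_eq_none_iff (xs := requests) (key := fun x : Int => x)
    exact absurd (hiff.mp hmx) hpre
  | some m =>
    refine ⟨m, rfl, PySem.List.max?_mem hmx, ?_⟩
    have := PySem.List.max?_isMax hmx
    simpa using this

-- ===== VERDICT (by name: the statement is the Claim_ definition above) =====
theorem find_max_budget_spec : Claim_unchanged_find_max_budget := by
  unfold Claim_unchanged_find_max_budget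
  intro requests t _ hpre
  unfold Spec_find_max_budget
  intro hnD
  have hnD' : pvF requests (-1) ≤ t := by
    unfold D_find_max_budget at hnD
    push_neg at hnD
    exact hnD hpre
  obtain ⟨M, hM, hMmem, hMmax⟩ := max_facts requests hpre
  unfold find_max_budget find_max_budget_alt
  rw [hM]
  set rs := PySem.List.sorted requests (fun x => x) false with hrs
  have hperm : rs.Perm requests := PySem.List.sorted_perm requests (fun x => x) false
  have hrsne : rs ≠ [] := by
    intro hc
    exact hpre ((hc ▸ hperm).symm.eq_nil)
  have hpw : rs.Pairwise (· ≤ ·) := by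
    have := PySem.List.sorted_pairwise (xs := requests) (key := fun x => x)
    simpa using this
  have hFF : ∀ m, pvF rs m = pvF requests m := fun m => pvF_perm hperm m
  have hlastle : ∀ x ∈ rs, x ≤ rs.getLast hrsne := pairwise_le_getLast hpw hrsne
  have hlast : rs.getLast hrsne = M := by
    apply le_antisymm
    · exact hMmax _ (hperm.mem_iff.mp (List.getLast_mem hrsne))
    · exact hlastle M (hperm.mem_iff.mpr hMmem)
  show fmbLoop requests t 0 M = match fmbScan t 0 rs with
    | some v => v
    | none => (PySem.List.pyGet? rs (-1)).getD 0
  rcases fmbScan_spec t rs 0 hrsne hpw with ⟨hnone, hfit⟩ | ⟨r, hsome, h1, h2, h3, h4⟩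
  · rw [hnone]
    show fmbLoop requests t 0 M = (PySem.List.pyGet? rs (-1)).getD 0
    have hBv : (PySem.List.pyGet? rs (-1)).getD 0 = M := by
      rw [PySem.List.pyGet?_neg_one]
      rw [List.getLast?_eq_getLast hrsne]
      simp [hlast]
    simp only [hBv]
    rw [hlast, hFF] at hfit
    rcases lt_or_ge M 0 with hM0 | hM0
    · rw [fmbLoop, dif_neg (by omega)]
    · have hA := fmbLoop_spec requests t (M + 1 - 0).toNat 0 M rfl (by omega)
      exact C_unique requests t M _ M
        ⟨by omega, hA.2.1, fun h => hA.2.2.1 h, hA.2.2.2⟩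
        ⟨by omega, le_refl M, fun _ => by omega, fun h => absurd h (lt_irrefl M)⟩
  · rw [hsome]
    show fmbLoop requests t 0 M = r
    rw [hFF] at h1 h2
    rw [hlast] at h3
    rcases lt_or_ge M 0 with hM0 | hM0
    · exfalso
      have : pvF requests (r + 1) ≤ pvF requests (-1) := pvF_mono requests (by omega)
      omega
    · have hrlb : -1 ≤ r := by
        by_contra hc
        have : pvF requests (r + 1) ≤ pvF requests (-1) := pvF_mono requests (by omega)
        omega
      have hA := fmbLoop_spec requests t (M + 1 - 0).toNat 0 M rfl (by omega)
      exact C_unique requests t M _ r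
        ⟨by omega, hA.2.1, fun h => hA.2.2.1 h, hA.2.2.2⟩
        ⟨hrlb, by omega, fun _ => by omega, fun _ => by omega⟩

theorem find_max_budget_changed : Claim_changed_find_max_budget := by
  unfold Claim_changed_find_max_budget
  refine ⟨by decide, by decide, by decide, ?_, ?_, by decide⟩
  · show find_max_budget [5] (-10) = -1
    have hm : PySem.List.max? [(5 : Int)] (fun x => x) = some 5 := by decide
    unfold find_max_budget
    rw [hm]
    show fmbLoop [5] (-10) 0 5 = -1
    have hA := fmbLoop_spec [5] (-10) ((5 + 1 - 0 : Int).toNat) 0 5 rfl (by norm_num)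
    exact C_unique [5] (-10) 5 _ (-1)
      ⟨by omega, hA.2.1, fun h => hA.2.2.1 h, hA.2.2.2⟩
      ⟨by omega, by omega, fun h => absurd h (by norm_num), fun _ => by decide⟩
  · show find_max_budget_alt [5] (-10) = -10
    decide

theorem find_max_budget_tight : Claim_exact_find_max_budget := by
  unfold Claim_exact_find_max_budget
  intro requests t _ hpre hD
  have hD2 : pvF requests (-1) > t := hD.2
  obtain ⟨M, hM, hMmem, hMmax⟩ := max_facts requests hpre
  unfold find_max_budget find_max_budget_alt
  rw [hM]
  set rs := PySem.List.sorted requests (fun x => x) false with hrs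
  have hperm : rs.Perm requests := PySem.List.sorted_perm requests (fun x => x) false
  have hrsne : rs ≠ [] := by
    intro hc
    exact hpre ((hc ▸ hperm).symm.eq_nil)
  have hpw : rs.Pairwise (· ≤ ·) := by
    have := PySem.List.sorted_pairwise (xs := requests) (key := fun x => x)
    simpa using this
  have hFF : ∀ m, pvF rs m = pvF requests m := fun m => pvF_perm hperm m
  have hlastle : ∀ x ∈ rs, x ≤ rs.getLast hrsne := pairwise_le_getLast hpw hrsne
  have hlast : rs.getLast hrsne = M := by
    apply le_antisymm
    · exact hMmax _ (hperm.mem_iff.mp (List.getLast_mem hrsne))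
    · exact hlastle M (hperm.mem_iff.mpr hMmem)
  show fmbLoop requests t 0 M ≠ match fmbScan t 0 rs with
    | some v => v
    | none => (PySem.List.pyGet? rs (-1)).getD 0
  rcases fmbScan_spec t rs 0 hrsne hpw with ⟨hnone, hfit⟩ | ⟨r, hsome, h1, h2, h3, h4⟩
  · exfalso
    rw [hlast, hFF] at hfit
    rcases lt_or_ge M (-1) with hM1 | hM1
    · have hsum : pvF requests M = requests.sum := pvF_sum requests M hMmax
      have hsum1 : pvF requests (-1) = requests.sum :=
        pvF_sum requests (-1) (fun x hx => by have := hMmax x hx; omega)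
      omega
    · have := pvF_mono requests hM1
      omega
  · rw [hsome]
    show fmbLoop requests t 0 M ≠ r
    rw [hFF] at h1 h2
    rw [hlast] at h3
    have hrneg : r < -1 := by
      by_contra hc
      have : pvF requests (-1) ≤ pvF requests r := pvF_mono requests (by omega)
      omega
    rcases lt_or_ge M 0 with hM0 | hM0
    · rw [fmbLoop, dif_neg (by omega)]
      omega
    · have hA := fmbLoop_spec requests t (M + 1 - 0).toNat 0 M rfl (by omega)
      have : -1 ≤ fmbLoop requests t 0 M := by have := hA.1; omega
      omega
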